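-- pv_equiv track=rewrite | github.com/wyk18703232953/myResearch | codeComplex/data/filteredData/python/linear/python_linear_0218.py | core_logic
-- ===== SOURCE A (Python) =====
-- def core_logic(n, a, b, l):
--     c, d = {}, {}
--     r = 0
--     for _, x, y in l:
--         i, j = a * x - y, (x, y)
--         r += c.get(i, 0) - d.get(j, 0)
--         c[i] = c.get(i, 0) + 1
--         d[j] = d.get(j, 0) + 1
--     return 2 * r
-- ===== SOURCE B (Python) =====
-- def core_logic(n, a, b, l):
--     # No hash maps: compare every pair of points directly.  A pair contributes iff its
--     # two points share the key a*x - y but are not the identical point (equal points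
--     # always share the key, which is exactly what A's d-counter subtracts off).
--     pts = [(x, y) for _, x, y in l]
--     r = 0
--     for q in range(len(pts)):
--         h = pts[q]
--         for p in pts[q + 1:]:
--             if a * p[0] - p[1] == a * h[0] - h[1] and p != h:
--                 r += 1
--     return 2 * r
-- ===== Notes on version B (the rewrite author's own statement) =====
-- stated objective: alternative
-- what changed: Drops both hash maps entirely: B recursively compares every pair of points directly, counting pairs whose keys a*x-y agree while the points differ, instead of A's one-pass counter lookups; it trades A's O(n) hashing for an explicitly quadratic pairwise scan.
import Mathlib
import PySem

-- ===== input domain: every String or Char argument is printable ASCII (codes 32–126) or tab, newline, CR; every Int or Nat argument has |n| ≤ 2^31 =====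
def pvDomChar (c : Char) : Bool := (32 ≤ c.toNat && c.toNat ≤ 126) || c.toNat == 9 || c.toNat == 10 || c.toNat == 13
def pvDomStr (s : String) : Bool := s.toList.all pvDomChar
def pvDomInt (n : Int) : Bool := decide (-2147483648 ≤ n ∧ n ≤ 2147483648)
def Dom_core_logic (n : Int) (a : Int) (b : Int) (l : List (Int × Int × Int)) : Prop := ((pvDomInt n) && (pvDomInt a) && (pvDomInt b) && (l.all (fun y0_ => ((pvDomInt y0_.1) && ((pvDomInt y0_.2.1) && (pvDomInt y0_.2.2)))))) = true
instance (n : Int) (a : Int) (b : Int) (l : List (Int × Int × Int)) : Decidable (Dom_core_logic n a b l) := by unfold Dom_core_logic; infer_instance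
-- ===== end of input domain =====

-- B drops A's two hash maps and instead compares every pair of points directly
-- (quadratic pairwise scan; 'alternative' decomposition, not faster).

-- ===== PORT A =====
-- incremental pass: r accumulates, per element, (earlier i-matches) - (earlier j-matches)
def core_logic (n : Int) (a : Int) (b : Int) (l : List (Int × Int × Int)) : Int :=
  let s := l.foldl
    (fun (s : PySem.Dict Int Int × PySem.Dict (Int × Int) Int × Int) t =>
      let x := t.2.1
      let y := t.2.2
      let i := a * x - y
      let j := (x, y)
      let r := s.2.2 + (s.1.getD i 0 - s.2.1.getD j 0)
      (s.1.insert i (s.1.getD i 0 + 1), s.2.1.insert j (s.2.1.getD j 0 + 1), r))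
    (PySem.Dict.empty, PySem.Dict.empty, 0)
  2 * s.2.2

-- ===== PORT B =====
-- outer loop over q with tail pts[q+1:] = structural recursion head/rest;
-- 'sum(1 for p in rest if cond)' / inner counting loop = countP over the rest
def pvPairsB (a : Int) : List (Int × Int) → Int
  | [] => 0
  | h :: rest =>
      ((rest.countP (fun p => decide (a * p.1 - p.2 = a * h.1 - h.2 ∧ p ≠ h))) : Int)
        + pvPairsB a rest

def core_logic_alt (n : Int) (a : Int) (b : Int) (l : List (Int × Int × Int)) : Int :=
  2 * pvPairsB a (l.map (fun t => (t.2.1, t.2.2)))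

-- ===== PRECONDITION & SPEC =====
def Spec_core_logic (n : Int) (a : Int) (b : Int) (l : List (Int × Int × Int)) (out : Int) : Prop := out = core_logic_alt n a b l
instance (n : Int) (a : Int) (b : Int) (l : List (Int × Int × Int)) (out : Int) : Decidable (Spec_core_logic n a b l out) := by unfold Spec_core_logic; infer_instance

-- ===== CLAIM (what is proved, stated in full; the proofs are below) =====
def Claim_equal_core_logic : Prop := ∀ (n : Int) (a : Int) (b : Int) (l : List (Int × Int × Int)), Dom_core_logic n a b l → Spec_core_logic n a b l (core_logic n a b l)

-- ===== LEMMAS AND PROOFS =====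

-- counting fold (Counter) over a list of keys
def pvCF {κ : Type} [BEq κ] (xs : List κ) : PySem.Dict κ Int :=
  xs.foldl (fun d x => d.insert x (d.getD x 0 + 1)) PySem.Dict.empty

theorem pvCF_getD {κ : Type} [BEq κ] [LawfulBEq κ] (xs : List κ) (k : κ) :
    (pvCF xs).getD k 0 = (xs.count k : Int) := by
  unfold pvCF
  rw [PySem.Dict.getD_foldl_insert_add_one]
  simp

-- appending a point at the end adds the number of earlier points matching it
theorem pvPairsB_append (a : Int) (t : Int × Int) (pts : List (Int × Int)) :
    pvPairsB a (pts ++ [t])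
      = pvPairsB a pts
        + ((pts.countP (fun p => decide (a * p.1 - p.2 = a * t.1 - t.2 ∧ p ≠ t))) : Int) := by
  induction pts with
  | nil => simp [pvPairsB]
  | cons h rest ih =>
    have hsym : (decide (a * t.1 - t.2 = a * h.1 - h.2 ∧ t ≠ h))
        = (decide (a * h.1 - h.2 = a * t.1 - t.2 ∧ h ≠ t)) := by
      rw [decide_eq_decide]
      constructor <;> rintro ⟨h1, h2⟩ <;> exact ⟨h1.symm, h2.symm⟩
    simp only [List.cons_append, pvPairsB, List.countP_append, List.countP_cons, ih,
      List.countP_nil, hsym]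
    push_cast
    ring

-- equal-key-count minus equal-point-count = count of (equal key ∧ distinct point)
theorem pv_count_split (a : Int) (t : Int × Int) (pts : List (Int × Int)) :
    pts.countP (fun p => decide (a * p.1 - p.2 = a * t.1 - t.2))
      = pts.countP (fun p => decide (a * p.1 - p.2 = a * t.1 - t.2 ∧ p ≠ t))
        + pts.count t := by
  induction pts with
  | nil => simp
  | cons h rest ih =>
    rw [List.count_cons, List.countP_cons, List.countP_cons]
    by_cases he : h = t
    · subst he
      simp [ih]; omega
    · by_cases hk : a * h.1 - h.2 = a * t.1 - t.2
      · simp [hk, he, ih]; omega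
      · simp [hk, he, ih]

-- invariant of A's single coupled fold, stated over the projected point list
theorem pvA_inv (a : Int) (pts : List (Int × Int)) :
    pts.foldl
      (fun (s : PySem.Dict Int Int × PySem.Dict (Int × Int) Int × Int) p =>
        let i := a * p.1 - p.2
        let r := s.2.2 + (s.1.getD i 0 - s.2.1.getD p 0)
        (s.1.insert i (s.1.getD i 0 + 1), s.2.1.insert p (s.2.1.getD p 0 + 1), r))
      (PySem.Dict.empty, PySem.Dict.empty, 0)
    = (pvCF (pts.map (fun p => a * p.1 - p.2)), pvCF pts, pvPairsB a pts) := by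
  induction pts using List.reverseRecOn with
  | nil => rfl
  | append_singleton xs t ih =>
    rw [List.foldl_append, ih]
    simp only [List.foldl_cons, List.foldl_nil, List.map_append, List.map_cons, List.map_nil]
    have h1 : pvCF (xs.map (fun p => a * p.1 - p.2) ++ [a * t.1 - t.2])
        = (pvCF (xs.map (fun p => a * p.1 - p.2))).insert (a * t.1 - t.2)
            ((pvCF (xs.map (fun p => a * p.1 - p.2))).getD (a * t.1 - t.2) 0 + 1) := by
      unfold pvCF; rw [List.foldl_append]; simp
    have h2 : pvCF (xs ++ [t]) = (pvCF xs).insert t ((pvCF xs).getD t 0 + 1) := by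
      unfold pvCF; rw [List.foldl_append]; simp
    rw [h1, h2, pvPairsB_append]
    refine Prod.ext rfl (Prod.ext rfl ?_)
    simp only [pvCF_getD]
    have hc : (xs.map (fun p => a * p.1 - p.2)).count (a * t.1 - t.2)
        = xs.countP (fun p => decide (a * p.1 - p.2 = a * t.1 - t.2)) := by
      rw [List.count_eq_countP, List.countP_map]
      apply List.countP_congr
      intro p _
      simp only [Function.comp]
      by_cases hpk : a * p.1 - p.2 = a * t.1 - t.2
      · simp [hpk]
      · simp [hpk]
    rw [hc, pv_count_split a t xs]
    push_cast
    ring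

-- ===== VERDICT (by name: the statement is the Claim_ definition above) =====
theorem core_logic_spec : Claim_equal_core_logic := by
  intro n a b l _
  unfold Spec_core_logic core_logic core_logic_alt
  have hfold :
      l.foldl
        (fun (s : PySem.Dict Int Int × PySem.Dict (Int × Int) Int × Int) t =>
          let x := t.2.1
          let y := t.2.2
          let i := a * x - y
          let j := (x, y)
          let r := s.2.2 + (s.1.getD i 0 - s.2.1.getD j 0)
          (s.1.insert i (s.1.getD i 0 + 1), s.2.1.insert j (s.2.1.getD j 0 + 1), r))
        (PySem.Dict.empty, PySem.Dict.empty, 0)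
      = (l.map (fun t => (t.2.1, t.2.2))).foldl
          (fun (s : PySem.Dict Int Int × PySem.Dict (Int × Int) Int × Int) p =>
            let i := a * p.1 - p.2
            let r := s.2.2 + (s.1.getD i 0 - s.2.1.getD p 0)
            (s.1.insert i (s.1.getD i 0 + 1), s.2.1.insert p (s.2.1.getD p 0 + 1), r))
          (PySem.Dict.empty, PySem.Dict.empty, 0) := by
    rw [List.foldl_map]
  rw [hfold, pvA_inv]
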